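-- pv_equiv track=rewrite | github.com/liskos/jakov | вариант 2023 2024/Богданов/2/5.py | f
-- ===== SOURCE A (Python) =====
-- def f(n):
--     n = bin(n)[2:]
--     if len(n) % 2 != 0:
--         if n[len(n)//2] == '0':
--             n = n[:len(n) // 2] + '1' + n[len(n) // 2 + 1:]
--         else:
--             n = n[:len(n) // 2] + '0' + n[len(n) // 2 + 1:]
--     else:
--         s1 = n[:len(n)//2 - 1]
--         s2 = n[len(n)//2-1:len(n)//2 + 1]
--         s3 = n[len(n)//2+1:]
--         s4 = ''
--         for i in s2:
--             if i == '1':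
--                 s4 += '0'
--             else:
--                 s4 += '1'
--         n = s1 + s4 + s3
--     return int(n,2)
-- ===== SOURCE B (Python) =====
-- def f(n):
--     L = n.bit_length() or 1
--     if L % 2:
--         return n ^ (1 << (L // 2))
--     return n ^ ((1 << (L // 2)) | (1 << (L // 2 - 1)))
-- ===== Notes on version B (the rewrite author's own statement) =====
-- stated objective: idiomatic
-- what changed: Replaced building a binary string, slicing/reassembling it around the middle and re-parsing it with int(.,2) by direct integer bit arithmetic: XOR n with a mask holding the middle bit (odd bit_length) or the two middle bits (even bit_length).
-- intended difference: On n = -1 (the only negative input that survives int(.,2)) A flips the characters 'b1' of bin(-1)[2:] to '10' and returns 2, an accident of the string slicing; B returns -1 ^ 1 = -2, the middle-bit flip for bit length 1, which is the intended value. — e.g. on f(-1): A returns 2, B returns -2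
import Mathlib
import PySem

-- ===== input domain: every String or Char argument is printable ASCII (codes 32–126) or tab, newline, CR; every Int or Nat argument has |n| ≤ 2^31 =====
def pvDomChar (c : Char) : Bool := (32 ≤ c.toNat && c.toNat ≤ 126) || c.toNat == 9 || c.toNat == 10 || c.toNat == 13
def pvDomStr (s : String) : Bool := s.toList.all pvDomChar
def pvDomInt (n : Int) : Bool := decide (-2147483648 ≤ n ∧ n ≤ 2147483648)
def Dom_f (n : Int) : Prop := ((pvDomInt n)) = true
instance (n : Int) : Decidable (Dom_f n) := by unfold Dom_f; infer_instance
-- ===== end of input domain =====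

-- B replaces A's binary-string slicing/reassembly/re-parsing by one XOR of n with a mask of the
-- middle bit(s) of n's binary representation (objective: idiomatic bit arithmetic).

-- ===== PORT A =====
-- literal transliteration of A: n = bin(n)[2:]; flip middle char(s) of the string; int(n, 2)
def f (n : Int) : Int :=
  let s : List Char := PySem.List.slice (PySem.Int.pyBin n).toList (some 2) none  -- bin(n)[2:]
  let L : Int := (s.length : Int)                                                 -- len(n)
  let r : List Char :=
    if PySem.Int.mod L 2 ≠ 0 then
      if PySem.List.pyGet? s (PySem.Int.floordiv L 2) = some '0' then             -- n[len(n)//2] == '0'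
        PySem.List.slice s none (some (PySem.Int.floordiv L 2)) ++ ['1'] ++
          PySem.List.slice s (some (PySem.Int.floordiv L 2 + 1)) none
      else
        PySem.List.slice s none (some (PySem.Int.floordiv L 2)) ++ ['0'] ++
          PySem.List.slice s (some (PySem.Int.floordiv L 2 + 1)) none
    else
      let s1 := PySem.List.slice s none (some (PySem.Int.floordiv L 2 - 1))
      let s2 := PySem.List.slice s (some (PySem.Int.floordiv L 2 - 1)) (some (PySem.Int.floordiv L 2 + 1))
      let s3 := PySem.List.slice s (some (PySem.Int.floordiv L 2 + 1)) none
      let s4 := s2.foldl (fun acc i => if i = '1' then acc ++ ['0'] else acc ++ ['1']) []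
      s1 ++ s4 ++ s3
  -- int(n, 2); ValueError (none) happens exactly for n ≤ -2 (stray 'b'), which Pre_f excludes
  (PySem.Int.ofCharsBase? r 2).getD 0

-- ===== PORT B =====
-- literal transliteration of B (Source B): L = n.bit_length() or 1; XOR with the middle-bit mask
def f_alt (n : Int) : Int :=
  let L0 := PySem.Int.bitLength n
  let L : Int := if L0 = 0 then 1 else (L0 : Int)                                 -- n.bit_length() or 1
  if PySem.Int.mod L 2 ≠ 0 then
    PySem.Int.bxor n ((1 : Int) <<< (PySem.Int.floordiv L 2).toNat)
  else
    PySem.Int.bxor n (PySem.Int.bor ((1 : Int) <<< (PySem.Int.floordiv L 2).toNat)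
      ((1 : Int) <<< (PySem.Int.floordiv L 2 - 1).toNat))

-- ===== PRECONDITION & SPEC =====
-- A raises ValueError on every n ≤ -2 (bin(n)[2:] keeps a stray 'b' that reaches int(., 2));
-- Pre_f excludes exactly those inputs.  (n = -1 is kept inside: there A returns — see D_f.)
def Pre_f (n : Int) : Prop := -1 ≤ n
instance (n : Int) : Decidable (Pre_f n) := by unfold Pre_f; infer_instance
def pvWitness_f : Int := 5

-- On n = -1 (the only negative input whose stray 'b' is itself consumed by the middle flip),
-- A flips the characters 'b1' to '10' and returns 2 — an accident of the string slicing —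
-- while B returns -1 XOR 1 = -2, the middle-bit flip for bit length 1, the intended value.
def D_f (n : Int) : Prop := n = -1
instance (n : Int) : Decidable (D_f n) := by unfold D_f; infer_instance

def Spec_f (n : Int) (out : Int) : Prop := ¬ D_f n → out = f_alt n
instance (n : Int) (out : Int) : Decidable (Spec_f n out) := by unfold Spec_f; infer_instance
def pvDiffWitness_f : Int := -1
def pvDiffWitnessOut_f : Int × Int := (2, -2)

-- ===== CLAIM (what is proved, stated in full; the proofs are below) =====
def Claim_unchanged_f : Prop := ∀ (n : Int), Dom_f n → Pre_f n → Spec_f n (f n)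
def Claim_changed_f : Prop := Dom_f (pvDiffWitness_f) ∧ Pre_f (pvDiffWitness_f) ∧
  D_f (pvDiffWitness_f) ∧ f (pvDiffWitness_f) = pvDiffWitnessOut_f.1 ∧
  f_alt (pvDiffWitness_f) = pvDiffWitnessOut_f.2 ∧ pvDiffWitnessOut_f.1 ≠ pvDiffWitnessOut_f.2
def Claim_exact_f : Prop := ∀ (n : Int), Dom_f n → Pre_f n → D_f n → f n ≠ f_alt n


-- ===== LEMMAS AND PROOFS =====


def pvVal (acc : Nat) (l : List Char) : Nat :=
  List.foldl (fun a x => a * 2 + (if x = '1' then 1 else 0)) acc l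

def pvBits (m : Nat) : List Char :=
  if m / 2 = 0 then [Nat.digitChar (m % 2)] else pvBits (m / 2) ++ [Nat.digitChar (m % 2)]
  decreasing_by exact Nat.bitwise_rec_lemma (by omega)

def pvBin01 (l : List Char) : Prop := ∀ x ∈ l, x = '0' ∨ x = '1'

lemma pvToDigitsCore_eq (fu : Nat) : ∀ (n : Nat) (ds : List Char), n < fu →
    Nat.toDigitsCore 2 fu n ds = pvBits n ++ ds := by
  induction fu with
  | zero => omega
  | succ fu ih =>
    intro n ds hn
    rw [Nat.toDigitsCore]
    by_cases h : n / 2 = 0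
    · simp only [h, if_pos]
      rw [pvBits]; simp [h]
    · simp only [h]
      rw [ih (n / 2) _ (by omega)]
      conv_rhs => rw [pvBits]
      rw [if_neg h]
      simp
lemma pvToDigits_eq (m : Nat) : Nat.toDigits 2 m = pvBits m := by
  rw [Nat.toDigits, pvToDigitsCore_eq (m + 1) m [] (by omega)]; simp

lemma pvBits_bin01 (m : Nat) : pvBin01 (pvBits m) := by
  induction m using pvBits.induct with
  | case1 m h =>
    rw [pvBits, if_pos h]
    have : m % 2 = 0 ∨ m % 2 = 1 := by omega
    rcases this with h2 | h2 <;> simp [pvBin01, h2] <;> decide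
  | case2 m h ih =>
    rw [pvBits, if_neg h]
    intro x hx
    rcases List.mem_append.1 hx with hx | hx
    · exact ih x hx
    · have : m % 2 = 0 ∨ m % 2 = 1 := by omega
      rcases this with h2 | h2 <;> simp [h2] at hx <;> simp [hx] <;> decide

lemma pvBits_ne_nil (m : Nat) : pvBits m ≠ [] := by
  rw [pvBits]; split <;> simp

lemma pvBits_length (m : Nat) (h : 0 < m) : (pvBits m).length = PySem.Int.bitLength (m : Int) := by
  induction m using pvBits.induct with
  | case1 m hm =>
    rw [pvBits, if_pos hm]
    have : m = 1 := by omega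
    subst this; decide
  | case2 m hm ih =>
    rw [pvBits, if_neg hm]
    rw [PySem.Int.bitLength_natCast h]
    simp [ih (by omega)]

lemma pvVal_acc (acc : Nat) (l : List Char) : pvVal acc l = acc * 2 ^ l.length + pvVal 0 l := by
  induction l generalizing acc with
  | nil => simp [pvVal]
  | cons c l ih =>
    show pvVal (acc * 2 + _) l = _
    rw [ih]
    conv_rhs => rw [show pvVal 0 (c :: l) = pvVal (0 * 2 + (if c = '1' then 1 else 0)) l from rfl, ih]
    simp [List.length_cons, pow_succ]
    by_cases hc : c = '1' <;> simp [hc] <;> ring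

lemma pvVal_append (a b : List Char) : pvVal 0 (a ++ b) = pvVal 0 a * 2 ^ b.length + pvVal 0 b := by
  rw [pvVal, List.foldl_append, ← pvVal, ← pvVal, pvVal_acc]

lemma pvVal_lt (l : List Char) (h : pvBin01 l) : pvVal 0 (l) < 2 ^ l.length := by
  induction l with
  | nil => simp [pvVal]
  | cons c l ih =>
    show pvVal (0 * 2 + _) l < _
    rw [pvVal_acc]
    have h1 : pvVal 0 l < 2 ^ l.length := ih (fun x hx => h x (by simp [hx]))
    rcases h c (by simp) with rfl | rfl <;> simp only [List.length_cons, pow_succ] <;>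
      simp <;> omega

lemma pvVal_pvBits (m : Nat) : pvVal 0 (pvBits m) = m := by
  have hd0 : Nat.digitChar 0 = '0' := rfl
  have hd1 : Nat.digitChar 1 = '1' := rfl
  induction m using pvBits.induct with
  | case1 m hm =>
    rw [pvBits, if_pos hm]
    have : m % 2 = 0 ∨ m % 2 = 1 := by omega
    rcases this with h2 | h2 <;> rw [h2] <;> simp [pvVal, hd0, hd1] <;> omega
  | case2 m hm ih =>
    rw [pvBits, if_neg hm, pvVal_append, ih]
    have : m % 2 = 0 ∨ m % 2 = 1 := by omega
    rcases this with h2 | h2 <;> rw [h2] <;> simp [pvVal, hd0, hd1] <;> omega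


lemma pvXorHalf (r x y : Nat) (hr : r ≤ 1) : (2 * x + r) ^^^ (2 * y) = 2 * (x ^^^ y) + r := by
  have h0 : (r = 0) ∨ (r = 1) := by omega
  rcases h0 with rfl | rfl
  · have := Nat.xor_bit false x false y
    simpa [Nat.bit_val] using this
  · have := Nat.xor_bit true x false y
    simpa [Nat.bit_val] using this

lemma pvXorMid (k : Nat) : ∀ a d b : Nat, d ≤ 1 → b < 2 ^ k →
    (a * 2 ^ (k + 1) + d * 2 ^ k + b) ^^^ 2 ^ k = a * 2 ^ (k + 1) + (1 - d) * 2 ^ k + b := by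
  induction k with
  | zero =>
    intro a d b hd hb
    have hb0 : b = 0 := by omega
    subst hb0
    rcases (by omega : d = 0 ∨ d = 1) with rfl | rfl
    · have := Nat.xor_one_of_even (n := a * 2 ^ (0 + 1) + 0 * 2 ^ 0 + 0) ⟨a, by omega⟩
      simpa using this
    · have := Nat.xor_one_of_odd (n := a * 2 ^ (0 + 1) + 1 * 2 ^ 0 + 0) ⟨a, by omega⟩
      simpa using this
  | succ k ih =>
    intro a d b hd hb
    obtain ⟨b', r, rfl, hr⟩ : ∃ b' r, b = 2 * b' + r ∧ r ≤ 1 := ⟨b / 2, b % 2, by omega, by omega⟩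
    have hb' : b' < 2 ^ k := by
      have : (2:Nat) ^ (k+1) = 2 * 2 ^ k := by ring
      omega
    have e1 : a * 2 ^ (k + 1 + 1) + d * 2 ^ (k + 1) + (2 * b' + r)
        = 2 * (a * 2 ^ (k + 1) + d * 2 ^ k + b') + r := by ring
    rw [e1]
    have hx := pvXorHalf r (a * 2 ^ (k + 1) + d * 2 ^ k + b') (2 ^ k) hr
    rw [show 2 * 2 ^ k = 2 ^ (k + 1) from by ring] at hx
    rw [hx, ih a d b' hd hb']
    ring

lemma pvOrPow (k : Nat) (h : 0 < k) : 2 ^ k ||| 2 ^ (k - 1) = (2 ^ k) ^^^ (2 ^ (k - 1)) := by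
  apply Nat.eq_of_testBit_eq
  intro i
  simp only [Nat.testBit_or, Nat.testBit_xor, Nat.testBit_two_pow]
  by_cases h1 : k = i <;> by_cases h2 : k - 1 = i <;> simp [h1, h2] <;> omega

def pvFlip (c : Char) : Char := if c = '1' then '0' else '1'

lemma pvFlipOne (t u : List Char) (c : Char) (hc : c = '0' ∨ c = '1') (hu : pvBin01 u) :
    pvVal 0 (t ++ (pvFlip c :: u)) = pvVal 0 (t ++ (c :: u)) ^^^ 2 ^ u.length := by
  have hdec : ∀ x : Char, pvVal 0 (t ++ (x :: u)) =
      pvVal 0 t * 2 ^ (u.length + 1) + (if x = '1' then 1 else 0) * 2 ^ u.length + pvVal 0 u := by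
    intro x
    rw [pvVal_append]
    have : pvVal 0 (x :: u) = pvVal (0 * 2 + (if x = '1' then 1 else 0)) u := rfl
    rw [this, pvVal_acc, pvVal_acc (0 * 2 + if x = '1' then 1 else 0)]
    by_cases hx : x = '1' <;> simp [hx, List.length_cons, pow_succ] <;> ring
  rw [hdec, hdec]
  have hvu : pvVal 0 u < 2 ^ u.length := pvVal_lt u hu
  rcases hc with rfl | rfl
  · have := pvXorMid u.length (pvVal 0 t) 0 (pvVal 0 u) (by omega) hvu
    simpa [pvFlip] using this.symm
  · have := pvXorMid u.length (pvVal 0 t) 1 (pvVal 0 u) (by omega) hvu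
    simpa [pvFlip] using this.symm

lemma pvGoSpec (g : Nat → List Char → Bool → Nat → Option Nat)
    (hnil : ∀ acc, g 2 [] true acc = some acc)
    (hcons : ∀ c rest ad acc, c = '0' ∨ c = '1' →
      g 2 (c :: rest) ad acc = g 2 rest true (acc * 2 + (if c = '1' then 1 else 0))) :
    ∀ cs acc, pvBin01 cs → g 2 cs true acc = some (pvVal acc cs) := by
  intro cs
  induction cs with
  | nil => intro acc _; exact hnil acc
  | cons c rest ih =>
    intro acc hb
    rw [hcons c rest true acc (hb c (by simp))]
    exact ih _ (fun x hx => hb x (by simp [hx]))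

lemma pvGoSpec' (g : Nat → List Char → Bool → Nat → Option Nat) (cs : List Char)
    (acc : Nat) (res : Option Nat) (heq : g 2 cs true acc = res)
    (hnil : ∀ acc, g 2 [] true acc = some acc)
    (hcons : ∀ c rest ad acc, c = '0' ∨ c = '1' →
      g 2 (c :: rest) ad acc = g 2 rest true (acc * 2 + (if c = '1' then 1 else 0)))
    (hb : pvBin01 cs) : res = some (pvVal acc cs) :=
  heq ▸ pvGoSpec g hnil hcons cs acc hb

lemma pvDropWhileEq (p : Char → Bool) (l : List Char) (h : ∀ c ∈ l, p c = false) :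
    List.dropWhile p l = l := by
  cases l with
  | nil => rfl
  | cons c r => rw [List.dropWhile_cons_of_neg (by simp [h c (by simp)])]

lemma pvParse01 (c : Char) (cs : List Char) (hc : c = '0' ∨ c = '1') (hcs : pvBin01 cs) :
    PySem.Int.ofCharsBase? (c :: cs) 2 = some ((pvVal 0 (c :: cs) : Nat) : Int) := by
  have hall : ∀ x ∈ c :: cs, PySem.Int.isIntSpace x = false := by
    intro x hx
    rcases List.mem_cons.1 hx with rfl | hx
    · rcases hc with rfl | rfl <;> decide
    · rcases hcs x hx with rfl | rfl <;> decide
  have hs1 : List.dropWhile PySem.Int.isIntSpace (c :: cs) = c :: cs := pvDropWhileEq _ _ hall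
  have hs2 : List.dropWhile PySem.Int.isIntSpace (c :: cs).reverse = (c :: cs).reverse :=
    pvDropWhileEq _ _ (by intro x hx; exact hall x (List.mem_reverse.mp hx))
  rcases hc with rfl | rfl
  · rcases cs with _ | ⟨c2, cs'⟩
    · decide
    · have hcs' : pvBin01 cs' := fun x hx => hcs x (by simp [hx])
      rcases hcs c2 (by simp) with rfl | rfl <;>
      · simp only [PySem.Int.ofCharsBase?, hs1, hs2, List.reverse_reverse]
        norm_num
        split
        case h_1 heq =>
          conv at heq => lhs; whnf
          have hv := pvGoSpec' _ _ _ _ heq (fun acc => rfl)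
            (fun c' rest ad acc h => by rcases h with rfl | rfl <;> rfl) hcs'
          exact absurd hv (by simp)
        case h_2 n heq =>
          conv at heq => lhs; whnf
          have hv := pvGoSpec' _ _ _ _ heq (fun acc => rfl)
            (fun c' rest ad acc h => by rcases h with rfl | rfl <;> rfl) hcs'
          norm_num
          rw [Option.some.inj hv]
          norm_cast
  · simp only [PySem.Int.ofCharsBase?, hs1, hs2, List.reverse_reverse]
    norm_num
    split
    case h_1 heq =>
      conv at heq => lhs; whnf
      have hv := pvGoSpec' _ _ _ _ heq (fun acc => rfl)
        (fun c' rest ad acc h => by rcases h with rfl | rfl <;> rfl) hcs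
      exact absurd hv (by simp)
    case h_2 n heq =>
      conv at heq => lhs; whnf
      have hv := pvGoSpec' _ _ _ _ heq (fun acc => rfl)
        (fun c' rest ad acc h => by rcases h with rfl | rfl <;> rfl) hcs
      norm_num
      rw [Option.some.inj hv]
      norm_cast


lemma pvParse01' (l : List Char) (hb : pvBin01 l) (hne : l ≠ []) :
    PySem.Int.ofCharsBase? l 2 = some ((pvVal 0 l : Nat) : Int) := by
  cases l with
  | nil => exact absurd rfl hne
  | cons c cs => exact pvParse01 c cs (hb c (by simp)) (fun x hx => hb x (by simp [hx]))

lemma pvFlipAt (l : List Char) (k : Nat) (hb : pvBin01 l) (hk : k < l.length) :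
    pvVal 0 (l.take k ++ pvFlip l[k] :: l.drop (k + 1)) = pvVal 0 l ^^^ 2 ^ (l.length - (k + 1)) := by
  have hd : l = l.take k ++ l[k] :: l.drop (k + 1) := by
    conv_lhs => rw [← List.take_append_drop k l, List.drop_eq_getElem_cons hk]
  have hu : (l.drop (k + 1)).length = l.length - (k + 1) := by simp
  rw [pvFlipOne _ _ _ (hb _ (List.getElem_mem hk))
      (fun x hx => hb x (List.mem_of_mem_drop hx)), ← hd, hu]

lemma pvFlipAt2 (l : List Char) (k : Nat) (hb : pvBin01 l) (hk1 : 1 ≤ k) (hk : k < l.length) :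
    pvVal 0 (l.take (k - 1) ++ [pvFlip l[k - 1], pvFlip l[k]] ++ l.drop (k + 1)) =
      (pvVal 0 l ^^^ 2 ^ (l.length - (k + 1))) ^^^ 2 ^ (l.length - k) := by
  have hk' : k - 1 < l.length := by omega
  have hd : l = l.take (k - 1) ++ l[k - 1] :: l[k] :: l.drop (k + 1) := by
    conv_lhs => rw [← List.take_append_drop (k - 1) l, List.drop_eq_getElem_cons hk']
    congr 2
    rw [show k - 1 + 1 = k from by omega, List.drop_eq_getElem_cons hk]
  have hu : (l.drop (k + 1)).length = l.length - (k + 1) := by simp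
  have hbu : pvBin01 (l.drop (k + 1)) := fun x hx => hb x (List.mem_of_mem_drop hx)
  have h1 : pvVal 0 (l.take (k - 1) ++ pvFlip l[k - 1] :: pvFlip l[k] :: l.drop (k + 1)) =
      pvVal 0 (l.take (k - 1) ++ l[k - 1] :: pvFlip l[k] :: l.drop (k + 1)) ^^^
        2 ^ (l.length - k) := by
    rw [pvFlipOne _ _ _ (hb _ (List.getElem_mem hk'))]
    · congr 1
      simp [hu]; omega
    · intro x hx
      rcases List.mem_cons.1 hx with rfl | hx2
      · unfold pvFlip; split <;> simp
      · exact hbu x hx2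
  have h2 : pvVal 0 ((l.take (k - 1) ++ [l[k - 1]]) ++ pvFlip l[k] :: l.drop (k + 1)) =
      pvVal 0 ((l.take (k - 1) ++ [l[k - 1]]) ++ l[k] :: l.drop (k + 1)) ^^^
        2 ^ (l.length - (k + 1)) := by
    rw [pvFlipOne _ _ _ (hb _ (List.getElem_mem hk)) hbu, hu]
  simp only [List.append_assoc, List.cons_append, List.nil_append] at h2 ⊢
  rw [h1, h2, ← hd]

lemma pvS4 (c1 c2 : Char) (h1 : c1 = '0' ∨ c1 = '1') (h2 : c2 = '0' ∨ c2 = '1') :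
    List.foldl (fun acc i => if i = '1' then acc ++ ['0'] else acc ++ ['1']) ([] : List Char)
      [c1, c2] = [pvFlip c1, pvFlip c2] := by
  rcases h1 with rfl | rfl <;> rcases h2 with rfl | rfl <;> decide

lemma pvShift (j : Nat) : (1 : Int) <<< j = ((2 ^ j : Nat) : Int) := by
  simp [Int.shiftLeft_eq]

lemma pvMain (m : Nat) (hm : 0 < m) : f (m : Int) = f_alt (m : Int) := by
  have hs : PySem.List.slice (PySem.Int.pyBin (m : Int)).toList (some 2) none = pvBits m := by
    rw [PySem.Int.toList_pyBin, PySem.List.slice_from _ (by norm_num)]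
    simp [PySem.Int.toBinChars0b, pvToDigits_eq, show ¬((m : Int) < 0) from by omega]
  have hb01 := pvBits_bin01 m
  have hval := pvVal_pvBits m
  have hne := pvBits_ne_nil m
  set l := pvBits m with hldef
  set L := l.length with hLdef
  have hL1 : 1 ≤ L := by rw [hLdef]; exact List.length_pos_of_ne_nil hne
  have hbl : PySem.Int.bitLength (m : Int) = L := (pvBits_length m hm).symm
  have hmod : PySem.Int.mod (L : Int) 2 = ((L % 2 : Nat) : Int) := by
    exact_mod_cast PySem.Int.mod_natCast L 2
  have hdiv : PySem.Int.floordiv (L : Int) 2 = ((L / 2 : Nat) : Int) := by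
    exact_mod_cast PySem.Int.floordiv_natCast L 2
  set k := L / 2 with hkdef
  rw [f, f_alt]
  simp only [hs, hbl, ← hLdef]
  rw [if_neg (by omega : ¬ L = 0)]
  simp only [hmod, hdiv]
  have hsliceto : PySem.List.slice l none (some ((k : Nat) : Int)) = l.take k := by
    rw [PySem.List.slice_to _ (by omega)]; simp
  have hslicefrom : PySem.List.slice l (some (((k : Nat) : Int) + 1)) none = l.drop (k + 1) := by
    rw [show ((k : Nat) : Int) + 1 = ((k + 1 : Nat) : Int) from by omega,
      PySem.List.slice_from _ (by omega)]
    simp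
  by_cases hpar : L % 2 = 1
  · -- odd length: flip the single middle character / XOR the single middle bit
    have hL : L = 2 * k + 1 := by omega
    have hkL : k < l.length := by omega
    have hcond : ¬ ((L % 2 : Nat) : Int) = 0 := by rw [hpar]; norm_num
    rw [if_pos hcond, if_pos hcond]
    rw [PySem.List.pyGet?_natCast, List.getElem?_eq_getElem hkL, hsliceto, hslicefrom]
    rw [pvShift, Int.toNat_natCast]
    have hflip : ∀ x : Char, x = pvFlip l[k] →
        (PySem.Int.ofCharsBase? (l.take k ++ [x] ++ l.drop (k + 1)) 2).getD 0 =
          PySem.Int.bxor (m : Int) ((2 ^ k : Nat) : Int) := by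
      intro x hx
      have hb' : pvBin01 (l.take k ++ [x] ++ l.drop (k + 1)) := by
        intro y hy
        simp only [List.mem_append, List.mem_singleton] at hy
        rcases hy with (hy | rfl) | hy
        · exact hb01 y (List.mem_of_mem_take hy)
        · rw [hx]; unfold pvFlip; split <;> simp
        · exact hb01 y (List.mem_of_mem_drop hy)
      rw [pvParse01' _ hb' (by simp), Option.getD_some, hx]
      rw [show (l.take k ++ [pvFlip l[k]] ++ l.drop (k + 1) : List Char)
          = l.take k ++ pvFlip l[k] :: l.drop (k + 1) from by simp]
      rw [pvFlipAt l k hb01 hkL, hval, PySem.Int.bxor_natCast]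
      rw [show l.length - (k + 1) = k from by omega]
    rcases hb01 l[k] (List.getElem_mem hkL) with hc | hc
    · rw [if_pos (by rw [hc])]
      exact hflip '1' (by rw [hc]; rfl)
    · rw [if_neg (by rw [hc]; simp)]
      exact hflip '0' (by rw [hc]; rfl)
  · -- even length: flip the two middle characters / XOR the two middle bits
    have hpar0 : L % 2 = 0 := by omega
    have hk1 : 1 ≤ k := by omega
    have hL : L = 2 * k := by omega
    have hkL : k < l.length := by omega
    have hkL' : k - 1 < l.length := by omega
    have hcond : ¬ ¬ ((L % 2 : Nat) : Int) = 0 := by rw [hpar0]; norm_num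
    rw [if_neg hcond, if_neg hcond]
    have hcast1 : ((k : Nat) : Int) - 1 = ((k - 1 : Nat) : Int) := by omega
    have hs1 : PySem.List.slice l none (some (((k : Nat) : Int) - 1)) = l.take (k - 1) := by
      rw [hcast1, PySem.List.slice_to _ (by omega)]; simp
    have hdropd : l.drop (k - 1) = l[k - 1] :: l[k] :: l.drop (k + 1) := by
      rw [List.drop_eq_getElem_cons hkL']
      congr 1
      rw [show k - 1 + 1 = k from by omega, List.drop_eq_getElem_cons hkL]
    have hs2 : PySem.List.slice l (some (((k : Nat) : Int) - 1)) (some (((k : Nat) : Int) + 1)) =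
        [l[k - 1], l[k]] := by
      rw [hcast1, show ((k : Nat) : Int) + 1 = ((k + 1 : Nat) : Int) from by omega,
        PySem.List.slice_natCast, show k + 1 - (k - 1) = 2 from by omega, hdropd]
      rfl
    have hc1 := hb01 l[k - 1] (List.getElem_mem hkL')
    have hc2 := hb01 l[k] (List.getElem_mem hkL)
    rw [hs1, hs2, hslicefrom, pvS4 _ _ hc1 hc2]
    have hb' : pvBin01 (l.take (k - 1) ++ [pvFlip l[k - 1], pvFlip l[k]] ++ l.drop (k + 1)) := by
      intro y hy
      simp only [List.mem_append, List.mem_cons] at hy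
      rcases hy with (hy | rfl | rfl | hy) | hy
      · exact hb01 y (List.mem_of_mem_take hy)
      · unfold pvFlip; split <;> simp
      · unfold pvFlip; split <;> simp
      · simp at hy
      · exact hb01 y (List.mem_of_mem_drop hy)
    rw [pvParse01' _ hb' (by simp), Option.getD_some]
    rw [pvFlipAt2 l k hb01 hk1 hkL, hval]
    rw [show l.length - (k + 1) = k - 1 from by omega, show l.length - k = k from by omega]
    rw [pvShift, pvShift, Int.toNat_natCast, hcast1, Int.toNat_natCast,
      PySem.Int.bor_natCast, pvOrPow k hk1, PySem.Int.bxor_natCast]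
    rw [Nat.xor_comm (2 ^ k), ← Nat.xor_assoc]

-- ===== VERDICT (by name: the statement is the Claim_ definition above) =====
theorem f_spec : Claim_unchanged_f := by
  unfold Claim_unchanged_f Spec_f Pre_f D_f
  intro n _ hpre hne
  have h0 : 0 ≤ n := by omega
  obtain ⟨m, rfl⟩ : ∃ m : Nat, n = (m : Int) := ⟨n.toNat, (Int.toNat_of_nonneg h0).symm⟩
  rcases Nat.eq_zero_or_pos m with rfl | hm
  · decide
  · exact pvMain m hm

theorem f_changed : Claim_changed_f := by unfold Claim_changed_f; decide

theorem f_tight : Claim_exact_f := by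
  unfold Claim_exact_f D_f
  intro n _ _ hd
  subst hd
  decide
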